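-- pv_equiv track=rewrite | github.com/AndySullivanTR/edgar | bis-china_monitor/bis_china_monitor.py | proximity_search
-- ===== SOURCE A (Python) =====
-- PROXIMITY_WINDOW = 150  # words (heuristic via char distance / ~6)
--
-- def proximity_search(text: str, terms1: list[str], terms2: list[str], window: int = PROXIMITY_WINDOW):
--     t = text.lower()
--     def positions(terms):
--         out=[]
--         for term in terms:
--             q=term.lower(); i=0
--             while True:
--                 j=t.find(q,i)
--                 if j==-1: break
--                 out.append((j,term)); i=j+1
--         return out
--     bisp, chnp = positions(terms1), positions(terms2)
--     matches=[]
--     for bp, bt in bisp: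
--         for cp, ct in chnp:
--             if abs(bp-cp)/6 <= window:
--                 start=max(0,min(bp,cp)-300)
--                 end=min(len(text),max(bp,cp)+300)
--                 matches.append((bt, ct, text[start:end]))
--     return matches
-- ===== SOURCE B (Python) =====
-- import bisect
--
-- PROXIMITY_WINDOW = 150  # words (heuristic via char distance / ~6)
--
-- def proximity_search(text: str, terms1: list[str], terms2: list[str], window: int = PROXIMITY_WINDOW):
--     t = text.lower()
--     n = len(text)
--
--     def occurrences(term):
--         q = term.lower()
--         res = []
--         j = t.find(q, 0)
--         while j != -1:
--             res.append(j)
--             j = t.find(q, j + 1)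
--         return res
--
--     lim = 6 * window  # abs(bp-cp)/6 <= window  <=>  abs(bp-cp) <= 6*window
--     t2occ = [(term, occurrences(term)) for term in terms2]
--     matches = []
--     for bt in terms1:
--         for bp in occurrences(bt):
--             for ct, ps in t2occ:
--                 lo = bisect.bisect_left(ps, bp - lim)
--                 hi = bisect.bisect_right(ps, bp + lim)
--                 for cp in ps[lo:hi]:
--                     start = max(0, min(bp, cp) - 300)
--                     end = min(n, max(bp, cp) + 300)
--                     matches.append((bt, ct, text[start:end]))
--     return matches
-- ===== Notes on version B (the rewrite author's own statement) =====
-- stated objective: alternative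
-- what changed: B replaces A's nested scan over all term1-occurrence x term2-occurrence pairs with per-term2 sorted occurrence lists queried by binary search (bisect_left/bisect_right), emitting only the in-window contiguous run of each list.
import Mathlib
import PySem

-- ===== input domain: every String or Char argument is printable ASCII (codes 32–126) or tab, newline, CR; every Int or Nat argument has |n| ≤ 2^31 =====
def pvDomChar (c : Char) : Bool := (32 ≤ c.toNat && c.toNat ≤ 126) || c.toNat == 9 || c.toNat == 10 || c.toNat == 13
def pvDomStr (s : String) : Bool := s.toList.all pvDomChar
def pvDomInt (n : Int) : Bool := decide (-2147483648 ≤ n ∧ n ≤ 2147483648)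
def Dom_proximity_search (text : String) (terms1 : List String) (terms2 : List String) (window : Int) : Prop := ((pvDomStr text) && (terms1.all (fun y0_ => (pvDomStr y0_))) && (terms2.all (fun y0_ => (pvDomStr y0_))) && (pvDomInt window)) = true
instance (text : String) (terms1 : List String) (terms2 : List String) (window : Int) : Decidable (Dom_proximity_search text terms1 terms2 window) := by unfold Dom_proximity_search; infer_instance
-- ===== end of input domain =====

-- B replaces A's nested scan over all term1-occurrence × term2-occurrence pairs with
-- per-term2 sorted occurrence lists queried by binary search (bisect), emitting only the
-- in-window contiguous run of each list; equal return values on the whole domain.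
-- In both ports the Python test `abs(bp-cp)/6 <= window` (float true division) is ported
-- as the integer test `|bp-cp| ≤ 6*window`, which is exact for |window| ≤ 2^31: the float
-- rounding of x/6 (relative error 2^-53) cannot cross the integer threshold.

-- ===== PORT A =====
-- the `while True: j=t.find(q,i); …; i=j+1` loop; fuel t.length+2 bounds its iteration count
def pvPosLoop (t q : List Char) (term : String) : Nat → Int → List (Int × String)
  | 0, _ => []
  | fuel+1, i =>
    let j := PySem.Chars.findFrom t q i
    if j = -1 then [] else (j, term) :: pvPosLoop t q term fuel (j + 1)

-- `positions(terms)`: one shared list appended to term after term = concatenation per term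
def pvPositions (t : List Char) (terms : List String) : List (Int × String) :=
  terms.flatMap (fun term => pvPosLoop t (PySem.Chars.lower term.toList) term (t.length + 2) 0)

def proximity_search (text : String) (terms1 : List String) (terms2 : List String) (window : Int) : List (String × String × String) :=
  let t := PySem.Chars.lower text.toList
  let bisp := pvPositions t terms1
  let chnp := pvPositions t terms2
  bisp.flatMap (fun bc =>
    chnp.flatMap (fun cc =>
      if |bc.1 - cc.1| ≤ 6 * window then
        [(bc.2, cc.2, PySem.Str.slice text (some (max 0 (min bc.1 cc.1 - 300)))
                        (some (min (text.toList.length : Int) (max bc.1 cc.1 + 300))))]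
      else []))

-- ===== PORT B =====
-- occurrences(term): the same find loop, keeping only the positions
def pvOccLoop (t q : List Char) : Nat → Int → List Int
  | 0, _ => []
  | fuel+1, i =>
    let j := PySem.Chars.findFrom t q i
    if j = -1 then [] else j :: pvOccLoop t q fuel (j + 1)

def pvOcc (t : List Char) (term : String) : List Int :=
  pvOccLoop t (PySem.Chars.lower term.toList) (t.length + 2) 0

def proximity_search_alt (text : String) (terms1 : List String) (terms2 : List String) (window : Int) : List (String × String × String) :=
  let t := PySem.Chars.lower text.toList
  let lim := 6 * window
  let t2occ := terms2.map (fun term => (term, pvOcc t term))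
  terms1.flatMap (fun bt =>
    (pvOcc t bt).flatMap (fun bp =>
      t2occ.flatMap (fun cc =>
        let lo := PySem.List.bisectLeft cc.2 (bp - lim)
        let hi := PySem.List.bisectRight cc.2 (bp + lim)
        (PySem.List.slice cc.2 (some (lo : Int)) (some (hi : Int))).map (fun cp =>
          (bt, cc.1, PySem.Str.slice text (some (max 0 (min bp cp - 300)))
                       (some (min (text.toList.length : Int) (max bp cp + 300))))))))

-- ===== PRECONDITION & SPEC =====
def Spec_proximity_search (text : String) (terms1 : List String) (terms2 : List String) (window : Int) (out : List (String × String × String)) : Prop := out = proximity_search_alt text terms1 terms2 window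
instance (text : String) (terms1 : List String) (terms2 : List String) (window : Int) (out : List (String × String × String)) : Decidable (Spec_proximity_search text terms1 terms2 window out) := by unfold Spec_proximity_search; infer_instance

-- ===== CLAIM (what is proved, stated in full; the proofs are below) =====
def Claim_equal_proximity_search : Prop := ∀ (text : String) (terms1 : List String) (terms2 : List String) (window : Int), Dom_proximity_search text terms1 terms2 window → Spec_proximity_search text terms1 terms2 window (proximity_search text terms1 terms2 window)

-- ===== LEMMAS AND PROOFS =====

theorem pvFindFrom_ge (t q : List Char) (i : Int) (h0 : 0 ≤ i)
    (hne : PySem.Chars.findFrom t q i ≠ -1) : i ≤ PySem.Chars.findFrom t q i := by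
  have hf := PySem.Chars.neg_one_le_find (List.drop i.toNat (List.take (Int.toNat ↑t.length) t)) q
  unfold PySem.Chars.findFrom at *
  dsimp only at hne ⊢
  split_ifs at hne ⊢ <;> omega

theorem pvPosLoop_eq_map (t q : List Char) (term : String) (fuel : Nat) (i : Int) :
    pvPosLoop t q term fuel i = (pvOccLoop t q fuel i).map (fun j => (j, term)) := by
  induction fuel generalizing i with
  | zero => rfl
  | succ n ih => simp [pvPosLoop, pvOccLoop]; split <;> simp [ih]

theorem pvPositions_eq (t : List Char) (ts : List String) :
    pvPositions t ts = ts.flatMap (fun term => (pvOcc t term).map (fun j => (j, term))) := by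
  simp [pvPositions, pvOcc, pvPosLoop_eq_map]

theorem pvOccLoop_ge (t q : List Char) (fuel : Nat) : ∀ (i : Int), 0 ≤ i →
    ∀ p ∈ pvOccLoop t q fuel i, i ≤ p := by
  induction fuel with
  | zero => intro i _ p hp; simp [pvOccLoop] at hp
  | succ n ih =>
    intro i h0 p hp
    simp only [pvOccLoop] at hp
    split at hp
    · simp at hp
    · rename_i hne
      have hij := pvFindFrom_ge t q i h0 hne
      rcases List.mem_cons.mp hp with h | h
      · omega
      · have := ih (PySem.Chars.findFrom t q i + 1) (by omega) p h; omega

theorem pvOccLoop_pairwise (t q : List Char) (fuel : Nat) : ∀ (i : Int), 0 ≤ i →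
    (pvOccLoop t q fuel i).Pairwise (fun a b => a ≤ b) := by
  induction fuel with
  | zero => intro i _; simp [pvOccLoop]
  | succ n ih =>
    intro i h0
    simp only [pvOccLoop]
    split
    · simp
    · rename_i hne
      have hij := pvFindFrom_ge t q i h0 hne
      refine List.Pairwise.cons ?_ (ih _ (by omega))
      intro p hp
      have := pvOccLoop_ge t q n (PySem.Chars.findFrom t q i + 1) (by omega) p hp
      omega

theorem pvDropTake_eq_filter (xs : List Int) (P : Int → Bool) : ∀ (lo hi : Nat),
    (∀ j (hj : j < xs.length), P xs[j] = decide (lo ≤ j ∧ j < hi)) →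
    (xs.drop lo).take (hi - lo) = xs.filter P := by
  induction xs with
  | nil => intro lo hi _; simp
  | cons a l ih =>
    intro lo hi h
    have ha : P a = decide (lo ≤ 0 ∧ 0 < hi) := h 0 (by simp)
    cases lo with
    | zero =>
      cases hi with
      | zero =>
        simp at ha
        simp only [List.drop_zero, List.take_zero, Nat.zero_sub]
        symm
        rw [List.filter_eq_nil_iff]
        intro x hx
        obtain ⟨j, hj, rfl⟩ := List.getElem_of_mem hx
        rw [h j hj]; simp
      | succ k =>
        simp at ha
        simp only [List.drop_zero, List.filter_cons, ha]
        have := ih 0 k (fun j hj => by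
          have := h (j+1) (by simpa using Nat.succ_lt_succ hj)
          simpa [Nat.succ_lt_succ_iff] using this)
        simpa using this
    | succ m =>
      simp at ha
      simp only [List.drop_succ_cons, List.filter_cons]
      rw [if_neg (by simp [ha])]
      have harith : hi - (m+1) = (hi - 1) - m := by omega
      rw [harith]
      exact ih m (hi - 1) (fun j hj => by
        have h2 := h (j+1) (by simpa using Nat.succ_lt_succ hj)
        simp only [List.getElem_cons_succ] at h2
        rw [h2]
        congr 1
        simp only [eq_iff_iff]
        omega)

theorem pvSlice_eq_filter (ps : List Int) (x y : Int) (hs : ps.Pairwise (fun a b => a ≤ b)) :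
    PySem.List.slice ps (some ((PySem.List.bisectLeft ps x : Nat) : Int))
                        (some ((PySem.List.bisectRight ps y : Nat) : Int))
      = ps.filter (fun p => decide (x ≤ p) && decide (p ≤ y)) := by
  obtain ⟨hl1, hl2, hl3⟩ := PySem.List.bisectLeft_spec ps x hs
  obtain ⟨hr1, hr2, hr3⟩ := PySem.List.bisectRight_spec ps y hs
  rw [PySem.List.slice_natCast]
  apply pvDropTake_eq_filter
  intro j hj
  by_cases hlo : PySem.List.bisectLeft ps x ≤ j
  · by_cases hhi : j < PySem.List.bisectRight ps y
    · have := hl3 j hj hlo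
      have := hr2 j hj hhi
      simp [*]
    · have h1 := hr3 j hj (by omega)
      have h2 : (decide (x ≤ ps[j]) && decide (ps[j] ≤ y)) = false := by simp; omega
      rw [h2]; symm; simp only [decide_eq_false_iff_not]; omega
  · have h1 := hl2 j hj (by omega)
    have h2 : (decide (x ≤ ps[j]) && decide (ps[j] ≤ y)) = false := by simp; omega
    rw [h2]; symm; simp only [decide_eq_false_iff_not]; omega

theorem pvFlatMap_if_eq_filter_map {β : Type} (ps : List Int) (P : Int → Prop) [DecidablePred P] (g : Int → β) :
    ps.flatMap (fun p => if P p then [g p] else []) = (ps.filter (fun p => decide (P p))).map g := by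
  induction ps with
  | nil => rfl
  | cons a l ih => by_cases h : P a <;> simp [h, ih]

theorem pvOcc_pairwise (t : List Char) (term : String) :
    (pvOcc t term).Pairwise (fun a b => a ≤ b) :=
  pvOccLoop_pairwise t _ _ 0 le_rfl

-- ===== VERDICT (by name: the statement is the Claim_ definition above) =====
theorem proximity_search_spec : Claim_equal_proximity_search := by
  intro text terms1 terms2 window _
  unfold Spec_proximity_search proximity_search proximity_search_alt
  simp only [pvPositions_eq, List.flatMap_map, List.flatMap_assoc]
  refine congrArg (fun f => List.flatMap f terms1) (funext fun bt => ?_)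
  refine congrArg (fun f => List.flatMap f (pvOcc (PySem.Chars.lower text.toList) bt)) (funext fun bp => ?_)
  refine congrArg (fun f => List.flatMap f terms2) (funext fun ct => ?_)
  rw [pvSlice_eq_filter _ _ _ (pvOcc_pairwise _ _)]
  rw [pvFlatMap_if_eq_filter_map _ (fun cp => |bp - cp| ≤ 6 * window)]
  exact congrArg (List.map _) (List.filter_congr (fun p _ => by
    rw [← Bool.decide_and, decide_eq_decide, abs_le]; omega))
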